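-- pv_equiv track=rewrite | github.com/estudafq/stock-dashboard | app.py | signal_from_variation
-- ===== SOURCE A (Python) =====
-- def signal_from_variation(v30, v3m, v6m):
--     values = [v for v in [v30, v3m, v6m] if v is not None]
--     if not values:
--         return "Sem dados"
--
--     min_drop = min(values)
--
--     if min_drop <= -20:
--         return "🔥🔥 Queda > 20%"
--     elif min_drop <= -15:
--         return "⚠️ Queda > 15%"
--     elif min_drop >= 15:
--         return "📈 Subida forte"
--     else:
--         return "Normal"
-- ===== SOURCE B (Python) =====
-- def _code(v):
--     # per-value severity class: 0 worst drop, 1 drop, 3 strong rise, 2 normal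
--     if v <= -20:
--         return 0
--     if v <= -15:
--         return 1
--     if v >= 15:
--         return 3
--     return 2
--
-- def signal_from_variation(v30, v3m, v6m):
--     code = None
--     for v in (v30, v3m, v6m):
--         if v is not None:
--             c = _code(v)
--             code = c if code is None else min(code, c)
--     if code is None:
--         return "Sem dados"
--     if code == 0:
--         return "🔥🔥 Queda > 20%"
--     if code == 1:
--         return "⚠️ Queda > 15%"
--     if code == 3:
--         return "📈 Subida forte"
--     return "Normal"
-- ===== Notes on version B (the rewrite author's own statement) =====
-- stated objective: alternative
-- what changed: Instead of taking the min of the raw values and thresholding it, B classifies each value independently into a severity code, keeps a running minimum code while iterating over the three arguments, and decodes that code into the message.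
import Mathlib
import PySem

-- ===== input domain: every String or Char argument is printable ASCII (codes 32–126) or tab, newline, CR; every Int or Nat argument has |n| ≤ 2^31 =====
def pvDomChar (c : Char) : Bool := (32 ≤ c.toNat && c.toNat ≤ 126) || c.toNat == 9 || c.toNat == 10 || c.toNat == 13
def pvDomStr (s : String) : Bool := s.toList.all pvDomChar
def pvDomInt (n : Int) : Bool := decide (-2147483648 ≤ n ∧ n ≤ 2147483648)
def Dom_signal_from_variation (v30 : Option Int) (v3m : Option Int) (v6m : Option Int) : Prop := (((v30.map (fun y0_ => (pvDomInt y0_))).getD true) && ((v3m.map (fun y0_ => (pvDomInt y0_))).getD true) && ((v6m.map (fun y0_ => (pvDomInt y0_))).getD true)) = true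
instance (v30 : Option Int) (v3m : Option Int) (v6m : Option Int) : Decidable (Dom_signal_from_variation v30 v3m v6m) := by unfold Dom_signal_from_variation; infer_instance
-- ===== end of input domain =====

-- ===== PORT A =====
-- B classifies each value into a severity code, keeps a running minimum code, and decodes it (alternative decomposition).
def signal_from_variation (v30 : Option Int) (v3m : Option Int) (v6m : Option Int) : String :=
  let values := ([v30, v3m, v6m].filterMap id)
  if values = [] then "Sem dados"
  else
    match PySem.List.min? values (fun x => x) with
    | none => "Sem dados"  -- unreachable: values nonempty
    | some min_drop =>
      if min_drop ≤ -20 then "🔥🔥 Queda > 20%"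
      else if min_drop ≤ -15 then "⚠️ Queda > 15%"
      else if min_drop ≥ 15 then "📈 Subida forte"
      else "Normal"

-- ===== PORT B =====
def pvCode (v : Int) : Int :=
  if v ≤ -20 then 0 else if v ≤ -15 then 1 else if v ≥ 15 then 3 else 2

def signal_from_variation_alt (v30 : Option Int) (v3m : Option Int) (v6m : Option Int) : String :=
  let step := fun (code : Option Int) (o : Option Int) =>
    match o with
    | none => code
    | some v =>
      let c := pvCode v
      match code with
      | none => some c
      | some k => some (min k c)
  match [v30, v3m, v6m].foldl step none with
  | none => "Sem dados"
  | some code =>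
    if code = 0 then "🔥🔥 Queda > 20%"
    else if code = 1 then "⚠️ Queda > 15%"
    else if code = 3 then "📈 Subida forte"
    else "Normal"

-- ===== PRECONDITION & SPEC =====
def Spec_signal_from_variation (v30 : Option Int) (v3m : Option Int) (v6m : Option Int) (out : String) : Prop := out = signal_from_variation_alt v30 v3m v6m
instance (v30 : Option Int) (v3m : Option Int) (v6m : Option Int) (out : String) : Decidable (Spec_signal_from_variation v30 v3m v6m out) := by unfold Spec_signal_from_variation; infer_instance

-- ===== CLAIM =====
def Claim_equal_signal_from_variation : Prop := ∀ (v30 : Option Int) (v3m : Option Int) (v6m : Option Int), Dom_signal_from_variation v30 v3m v6m → Spec_signal_from_variation v30 v3m v6m (signal_from_variation v30 v3m v6m)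

-- ===== LEMMAS AND PROOFS =====
lemma pvCode_min (x y : Int) : min (pvCode x) (pvCode y) = pvCode (min x y) := by
  unfold pvCode
  rcases le_total x y with h | h <;> simp only [min_def] <;> split_ifs <;> first | rfl | omega

lemma pvDecode_code (m : Int) :
    (if m ≤ -20 then "🔥🔥 Queda > 20%"
     else if m ≤ -15 then "⚠️ Queda > 15%"
     else if m ≥ 15 then "📈 Subida forte"
     else "Normal") =
    (if pvCode m = 0 then "🔥🔥 Queda > 20%"
     else if pvCode m = 1 then "⚠️ Queda > 15%"
     else if pvCode m = 3 then "📈 Subida forte"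
     else "Normal") := by
  unfold pvCode
  split_ifs <;> first | rfl | omega

-- ===== VERDICT =====
theorem signal_from_variation_spec : Claim_equal_signal_from_variation := by
  intro v30 v3m v6m _
  unfold Spec_signal_from_variation signal_from_variation signal_from_variation_alt
  rcases v30 with _ | a <;> rcases v3m with _ | b <;> rcases v6m with _ | c <;>
    simp only [List.filterMap, id_eq, PySem.List.min?_id_cons, List.foldl,
      pvCode_min, reduceCtorEq, if_false] <;>
    first | rfl | exact pvDecode_code _
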